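-- pv_equiv track=rewrite | github.com/m3m03y/grafika | proj_1/proj5_Kinga_Lipiszko_PS4.py | __findHistogramMinMax
-- ===== SOURCE A (Python) =====
-- def __findHistogramMinMax(histogram):
--     minIdx = -1
--     maxIdx = 0
--     for i in range(len(histogram)):
--         if (histogram[i] > 0):
--             maxIdx = i
--             if (minIdx < 0): minIdx = i
--     return [minIdx, maxIdx]
-- ===== SOURCE B (Python) =====
-- def __findHistogramMinMax(histogram):
--     minIdx = -1
--     for i in range(len(histogram)):
--         if histogram[i] > 0:
--             minIdx = i
--             break
--     maxIdx = 0
--     for i in range(len(histogram) - 1, -1, -1):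
--         if histogram[i] > 0:
--             maxIdx = i
--             break
--     return [minIdx, maxIdx]
-- ===== Notes on version B (the rewrite author's own statement) =====
-- stated objective: alternative
-- what changed: Replaces the single full-length pass maintaining both bounds with two independent early-exit directional scans: a forward scan breaking at the first nonzero bin and a backward scan breaking at the last nonzero bin.
import Mathlib
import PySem

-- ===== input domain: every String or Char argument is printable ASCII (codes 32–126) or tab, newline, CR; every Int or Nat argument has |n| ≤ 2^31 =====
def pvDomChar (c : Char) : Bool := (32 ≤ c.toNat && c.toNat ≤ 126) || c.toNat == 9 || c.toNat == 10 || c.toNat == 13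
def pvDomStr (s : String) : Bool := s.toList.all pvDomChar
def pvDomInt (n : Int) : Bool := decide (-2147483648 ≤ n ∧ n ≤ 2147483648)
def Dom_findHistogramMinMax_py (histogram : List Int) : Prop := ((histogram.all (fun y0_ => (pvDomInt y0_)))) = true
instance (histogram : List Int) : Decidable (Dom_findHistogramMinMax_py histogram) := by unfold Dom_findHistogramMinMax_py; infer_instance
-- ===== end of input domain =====

-- B replaces A's single combined pass by two independent early-exit directional scans (forward for the first
-- nonzero index, backward for the last); same cost class, different decomposition.

-- ===== PORT A =====
-- A's loop over i in range(len(histogram)), carrying (minIdx, maxIdx); iterating the list with its index.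
def goA_findHistogramMinMax : List Int → Int → Int → Int → Int × Int
  | [], _, mn, mx => (mn, mx)
  | x :: xs, i, mn, mx =>
      if x > 0 then goA_findHistogramMinMax xs (i + 1) (if mn < 0 then i else mn) i
      else goA_findHistogramMinMax xs (i + 1) mn mx

def findHistogramMinMax_py (histogram : List Int) : List Int :=
  let r := goA_findHistogramMinMax histogram 0 (-1) 0
  [r.1, r.2]

-- ===== PORT B =====
-- forward scan with break: first index with value > 0, else -1
def firstPos_findHistogramMinMax : List Int → Int → Int
  | [], _ => -1
  | x :: xs, i => if x > 0 then i else firstPos_findHistogramMinMax xs (i + 1)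

-- backward scan with break (ported as a forward scan of the reversed list with descending index): else 0
def lastPosRev_findHistogramMinMax : List Int → Int → Int
  | [], _ => 0
  | x :: xs, i => if x > 0 then i else lastPosRev_findHistogramMinMax xs (i - 1)

def findHistogramMinMax_py_alt (histogram : List Int) : List Int :=
  [firstPos_findHistogramMinMax histogram 0,
   lastPosRev_findHistogramMinMax histogram.reverse ((histogram.length : Int) - 1)]

-- ===== PRECONDITION & SPEC =====
def Spec_findHistogramMinMax_py (histogram : List Int) (out : List Int) : Prop := out = findHistogramMinMax_py_alt histogram
instance (histogram : List Int) (out : List Int) : Decidable (Spec_findHistogramMinMax_py histogram out) := by unfold Spec_findHistogramMinMax_py; infer_instance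

-- ===== CLAIM (what is proved, stated in full; the proofs are below) =====
def Claim_equal_findHistogramMinMax_py : Prop := ∀ (histogram : List Int), Dom_findHistogramMinMax_py histogram → Spec_findHistogramMinMax_py histogram (findHistogramMinMax_py histogram)

-- ===== LEMMAS AND PROOFS =====

-- once minIdx is nonnegative it never changes
lemma goA_fst_fixed (xs : List Int) (i mn mx : Int) (h : 0 ≤ mn) :
    (goA_findHistogramMinMax xs i mn mx).1 = mn := by
  induction xs generalizing i mx with
  | nil => rfl
  | cons x xs ih =>
      simp only [goA_findHistogramMinMax]
      split
      · rw [if_neg (by omega)]; exact ih _ _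
      · exact ih _ _

-- while minIdx is negative, A's first component is B's forward scan
lemma goA_fst (xs : List Int) (i mx : Int) (hi : 0 ≤ i) :
    (goA_findHistogramMinMax xs i (-1) mx).1 = firstPos_findHistogramMinMax xs i := by
  induction xs generalizing i mx with
  | nil => rfl
  | cons x xs ih =>
      simp only [goA_findHistogramMinMax, firstPos_findHistogramMinMax]
      split
      · rw [if_pos (by omega : (-1 : Int) < 0)]; exact goA_fst_fixed _ _ _ _ hi
      · exact ih _ _ (by omega)

-- A's second component, abstracted from minIdx
def lastAcc_findHistogramMinMax : List Int → Int → Int → Int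
  | [], _, mx => mx
  | x :: xs, i, mx => lastAcc_findHistogramMinMax xs (i + 1) (if x > 0 then i else mx)

lemma goA_snd (xs : List Int) (i mn mx : Int) :
    (goA_findHistogramMinMax xs i mn mx).2 = lastAcc_findHistogramMinMax xs i mx := by
  induction xs generalizing i mn mx with
  | nil => rfl
  | cons x xs ih =>
      simp only [goA_findHistogramMinMax, lastAcc_findHistogramMinMax]
      split <;> simp_all

lemma lastAcc_append (xs : List Int) (x : Int) (i mx : Int) :
    lastAcc_findHistogramMinMax (xs ++ [x]) i mx =
      if x > 0 then i + (xs.length : Int) else lastAcc_findHistogramMinMax xs i mx := by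
  induction xs generalizing i mx with
  | nil => simp [lastAcc_findHistogramMinMax]
  | cons y ys ih =>
      simp only [List.cons_append, lastAcc_findHistogramMinMax, ih]
      split
      · push_cast [List.length_cons]; omega
      · rfl

lemma lastPosRev_eq (xs : List Int) :
    lastPosRev_findHistogramMinMax xs.reverse ((xs.length : Int) - 1) =
      lastAcc_findHistogramMinMax xs 0 0 := by
  induction xs using List.reverseRecOn with
  | nil => rfl
  | append_singleton ys x ih =>
      rw [List.reverse_append, lastAcc_append]
      simp only [List.reverse_singleton, List.singleton_append, lastPosRev_findHistogramMinMax,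
        List.length_append, List.length_singleton]
      push_cast
      split
      · omega
      · rw [show ((ys.length : Int) + 1 - 1 - 1) = (ys.length : Int) - 1 by ring]
        simpa using ih

-- ===== VERDICT (by name: the statement is the Claim_ definition above) =====
theorem findHistogramMinMax_py_spec : Claim_equal_findHistogramMinMax_py := by
  intro h _
  show _ = _
  simp only [findHistogramMinMax_py, findHistogramMinMax_py_alt]
  rw [goA_fst h 0 0 (by omega), goA_snd, lastPosRev_eq]
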